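-- pv_equiv track=rewrite | github.com/daugbit/Cursos | Python 3 (Udemy)/ex019_validador_CNPJ/cnpj.py | sequenceone
-- ===== SOURCE A (Python) =====
-- def sequenceone(cnpj):
--     """
--     Função que cria a sequência auxiliar que será utilizada para cálculo do primeiro dígito
--     param. cnpj: número do CNPJ no formato de lista de dígitos, sem os dígitos verificadores
--     return: lista auxiliar para o cálculo
--     """
--     aux = []
--     num = 5
--     for i in cnpj:
--         if num >= 2:
--             aux.append(str(num))
--         else:
--             num = 9
--             aux.append(str(num))
--         num -= 1
--     return aux
-- ===== SOURCE B (Python) =====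
-- def sequenceone(cnpj):
--     cycle = (5, 4, 3, 2, 9, 8, 7, 6)
--     return [str(cycle[i % 8]) for i in range(len(cnpj))]
-- ===== Notes on version B (the rewrite author's own statement) =====
-- stated objective: simpler
-- what changed: Replaced the stateful decrement-and-reset counter loop with a direct comprehension indexing a fixed period-8 weight table by i % 8.
import Mathlib
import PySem

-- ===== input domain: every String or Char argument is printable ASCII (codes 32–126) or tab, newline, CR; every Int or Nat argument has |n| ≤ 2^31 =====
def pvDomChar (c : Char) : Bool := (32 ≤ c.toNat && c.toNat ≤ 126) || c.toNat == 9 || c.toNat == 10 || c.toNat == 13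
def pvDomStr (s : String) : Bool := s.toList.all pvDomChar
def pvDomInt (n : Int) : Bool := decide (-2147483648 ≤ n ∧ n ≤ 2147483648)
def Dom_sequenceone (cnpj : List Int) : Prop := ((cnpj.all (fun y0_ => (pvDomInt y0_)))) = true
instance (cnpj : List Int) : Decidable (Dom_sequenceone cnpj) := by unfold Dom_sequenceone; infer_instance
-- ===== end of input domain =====

-- B replaces A's stateful counter (decrement, reset to 9 below 2) with a fixed
-- period-8 weight table indexed by position; return values are identical.

-- ===== PORT A =====
-- A: fold over cnpj carrying (aux, num); num starts at 5, is reset to 9 when it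
-- drops below 2, the emitted digit is str(num), and num is decremented each step.
def sequenceone (cnpj : List Int) : List String :=
  (cnpj.foldl (fun (st : List String × Int) _ =>
      if st.2 ≥ 2 then (st.1 ++ [PySem.Int.toStr st.2], st.2 - 1)
      else (st.1 ++ [PySem.Int.toStr 9], 9 - 1)) ([], 5)).1

-- ===== PORT B =====
def sequenceone_alt (cnpj : List Int) : List String :=
  (List.range cnpj.length).map (fun i =>
    PySem.Int.toStr (([5, 4, 3, 2, 9, 8, 7, 6] : List Int).getD (i % 8) 0))

-- ===== PRECONDITION & SPEC =====
def Spec_sequenceone (cnpj : List Int) (out : List String) : Prop := out = sequenceone_alt cnpj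
instance (cnpj : List Int) (out : List String) : Decidable (Spec_sequenceone cnpj out) := by unfold Spec_sequenceone; infer_instance

-- ===== CLAIM (what is proved, stated in full; the proofs are below) =====
def Claim_equal_sequenceone : Prop := ∀ (cnpj : List Int), Dom_sequenceone cnpj → Spec_sequenceone cnpj (sequenceone cnpj)

-- ===== LEMMAS AND PROOFS =====

-- num entering step n of A's loop, as a function of the step index
def entA (n : Nat) : Int := ([5, 4, 3, 2, 1, 8, 7, 6] : List Int).getD (n % 8) 0

-- the digit emitted at step n (B's table)
def cycB (n : Nat) : Int := ([5, 4, 3, 2, 9, 8, 7, 6] : List Int).getD (n % 8) 0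

theorem seq_loop_inv (l : List Int) (aux : List String) (n : Nat) :
    l.foldl (fun (st : List String × Int) _ =>
      if st.2 ≥ 2 then (st.1 ++ [PySem.Int.toStr st.2], st.2 - 1)
      else (st.1 ++ [PySem.Int.toStr 9], 9 - 1)) (aux, entA n)
    = (aux ++ (List.range l.length).map (fun i => PySem.Int.toStr (cycB (n + i))),
       entA (n + l.length)) := by
  induction l generalizing aux n with
  | nil => simp
  | cons h t ih =>
    have hstep :
        (if entA n ≥ 2 then (aux ++ [PySem.Int.toStr (entA n)], entA n - 1)
         else (aux ++ [PySem.Int.toStr 9], (9 : Int) - 1))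
        = (aux ++ [PySem.Int.toStr (cycB n)], entA (n + 1)) := by
      have h8 : n % 8 = 0 ∨ n % 8 = 1 ∨ n % 8 = 2 ∨ n % 8 = 3 ∨ n % 8 = 4 ∨
                n % 8 = 5 ∨ n % 8 = 6 ∨ n % 8 = 7 := by omega
      rcases h8 with h|h|h|h|h|h|h|h <;>
        · have h' : (n + 1) % 8 = (n % 8 + 1) % 8 := by omega
          simp [entA, cycB, h, h']
    simp only [List.foldl_cons]
    rw [hstep, ih]
    have hf : ((fun i => PySem.Int.toStr (cycB (n + i))) ∘ Nat.succ)
        = fun i => PySem.Int.toStr (cycB (n + 1 + i)) := by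
      funext i; simp only [Function.comp_apply, Nat.succ_eq_add_one]; congr 2; omega
    simp only [List.length_cons]
    rw [List.range_succ_eq_map, List.map_cons, List.map_map, hf]
    simp only [List.append_assoc, List.singleton_append, Nat.add_zero, Prod.mk.injEq]
    exact ⟨trivial, by congr 1; omega⟩

-- ===== VERDICT (by name: the statement is the Claim_ definition above) =====
theorem sequenceone_spec : Claim_equal_sequenceone := by
  intro cnpj _
  unfold Spec_sequenceone sequenceone sequenceone_alt
  have h := seq_loop_inv cnpj [] 0
  have h5 : entA 0 = 5 := by simp [entA]
  rw [h5] at h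
  rw [h]
  simp only [List.nil_append, Nat.zero_add]
  apply List.map_congr_left; intro i _
  simp [cycB]
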